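-- pv_equiv track=rewrite | github.com/tejaschauhan373/DSA | Dynamic Programming/selling_wines.py | wines_top_down
-- ===== SOURCE A (Python) =====
-- def wines_top_down(dp: list, prices: list, L: int, R: int, y: int):
--     # base case
--     if L > R:
--         return 0
--
--     if dp[L][R] != 0:
--         return dp[L][R]
--
--     # recursive case
--     pick_left = y * prices[L] + wines_top_down(dp, prices, L + 1, R, y + 1)
--     pick_right = y * prices[R] + wines_top_down(dp, prices, L, R - 1, y + 1)
--
--     dp[L][R] = max(pick_left, pick_right)
--     return dp[L][R]
-- ===== SOURCE B (Python) =====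
-- def wines_top_down(dp: list, prices: list, L: int, R: int, y: int):
--     # Bottom-up DP over window length, memo respected via a private table
--     # (does not write into the caller's dp; A does -- return value is the same).
--     if L > R:
--         return 0
--     best = {}
--     span = R - L
--     for length in range(1, span + 2):
--         year = y + span - (length - 1)
--         for l in range(L, R - length + 2):
--             r = l + length - 1
--             c = dp[l][r]
--             if c != 0:
--                 best[(l, r)] = c
--             else:
--                 left = best[(l + 1, r)] if l + 1 <= r else 0
--                 right = best[(l, r - 1)] if l <= r - 1 else 0
--                 best[(l, r)] = max(year * prices[l] + left,
--                                    year * prices[r] + right)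
--     return best[(L, R)]
-- ===== Notes on version B (the rewrite author's own statement) =====
-- stated objective: alternative
-- what changed: Replaced A's top-down memoized recursion (which mutates the caller's dp matrix as its memo) by an iterative bottom-up DP that fills a private table by increasing window length, computing each window's year from its length.
-- outside the precondition, e.g. on wines_top_down([[0, 0], [0, 0]], [6, 2], -2, 1, 1): A returns 40, B returns 44
import Mathlib
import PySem

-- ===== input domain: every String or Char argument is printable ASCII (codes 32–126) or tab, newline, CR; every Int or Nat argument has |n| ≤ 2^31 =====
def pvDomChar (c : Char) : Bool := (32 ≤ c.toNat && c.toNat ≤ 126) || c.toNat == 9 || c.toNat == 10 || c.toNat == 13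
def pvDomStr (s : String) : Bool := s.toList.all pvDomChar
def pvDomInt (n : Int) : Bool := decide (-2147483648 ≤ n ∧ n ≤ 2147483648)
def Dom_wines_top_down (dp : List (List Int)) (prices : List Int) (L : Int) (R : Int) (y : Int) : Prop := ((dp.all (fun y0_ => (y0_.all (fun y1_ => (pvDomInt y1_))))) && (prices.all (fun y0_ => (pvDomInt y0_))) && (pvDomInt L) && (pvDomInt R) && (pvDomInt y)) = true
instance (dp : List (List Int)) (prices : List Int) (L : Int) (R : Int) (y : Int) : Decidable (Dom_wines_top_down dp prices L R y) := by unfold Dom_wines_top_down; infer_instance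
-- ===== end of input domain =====

-- B replaces A's memoized recursion by an iterative bottom-up fill over window
-- lengths (same return value; A memoizes into the caller's dp in place, B keeps
-- a private table and leaves dp untouched — the claim is about the return value).

-- ===== PORT A =====
-- state-threaded transliteration of A's recursion: the pair is (return value, dp after mutation)
def winesA_go (dp : List (List Int)) (prices : List Int) (L : Int) (R : Int) (y : Int) :
    Int × List (List Int) :=
  if h : L > R then (0, dp)
  else
    -- dp[L][R]; out-of-range / negative indices are excluded by Pre_ (IndexError / wraparound)
    let cur := PySem.List.pyGetD (PySem.List.pyGetD dp L []) R 0
    if cur ≠ 0 then (cur, dp)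
    else
      let resL := winesA_go dp prices (L + 1) R (y + 1)
      let pick_left := y * PySem.List.pyGetD prices L 0 + resL.1
      let resR := winesA_go resL.2 prices L (R - 1) (y + 1)
      let pick_right := y * PySem.List.pyGetD prices R 0 + resR.1
      let v := max pick_left pick_right
      (v, PySem.List.pySetD resR.2 L (PySem.List.pySetD (PySem.List.pyGetD resR.2 L []) R v))
termination_by (R + 1 - L).toNat
decreasing_by all_goals omega

def wines_top_down (dp : List (List Int)) (prices : List Int) (L : Int) (R : Int) (y : Int) : Int :=
  (winesA_go dp prices L R y).1

-- ===== PORT B =====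
def wines_top_down_alt (dp : List (List Int)) (prices : List Int) (L : Int) (R : Int) (y : Int) : Int :=
  if L > R then 0
  else
    let span := R - L
    let best :=
      (PySem.List.pyRange 1 (span + 2) 1).foldl (fun best length =>
        let year := y + span - (length - 1)
        (PySem.List.pyRange L (R - length + 2) 1).foldl (fun best l =>
          let r := l + length - 1
          let c := PySem.List.pyGetD (PySem.List.pyGetD dp l []) r 0
          if c ≠ 0 then best.insert (l, r) c
          else
            let left := if l + 1 ≤ r then best.getD (l + 1, r) 0 else 0
            let right := if l ≤ r - 1 then best.getD (l, r - 1) 0 else 0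
            best.insert (l, r)
              (max (year * PySem.List.pyGetD prices l 0 + left)
                   (year * PySem.List.pyGetD prices r 0 + right))) best)
        PySem.Dict.empty
    -- best[(L, R)]: the key is always present here (L ≤ R), so getD's default is never used
    best.getD (L, R) 0

-- ===== PRECONDITION & SPEC =====
-- Pre_ excludes out-of-range indices (IndexError in A) and negative (wrapping) indices:
-- Python's negative-index wraparound can alias distinct logical windows onto one dp cell,
-- making A's memoization order accidental.
def Pre_wines_top_down (dp : List (List Int)) (prices : List Int) (L : Int) (R : Int) (y : Int) : Prop :=
  L > R ∨ (0 ≤ L ∧ R < (prices.length : Int) ∧ R < (dp.length : Int) ∧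
    ∀ i ∈ Finset.Icc L.toNat R.toNat, R < ((dp.getD i []).length : Int))
instance (dp : List (List Int)) (prices : List Int) (L : Int) (R : Int) (y : Int) : Decidable (Pre_wines_top_down dp prices L R y) := by unfold Pre_wines_top_down; infer_instance

def pvWitness_wines_top_down : List (List Int) × List Int × Int × Int × Int :=
  ([[0, 0], [0, 0]], [3, 1], 0, 1, 1)

def Spec_wines_top_down (dp : List (List Int)) (prices : List Int) (L : Int) (R : Int) (y : Int) (out : Int) : Prop := out = wines_top_down_alt dp prices L R y
instance (dp : List (List Int)) (prices : List Int) (L : Int) (R : Int) (y : Int) (out : Int) : Decidable (Spec_wines_top_down dp prices L R y out) := by unfold Spec_wines_top_down; infer_instance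

-- ===== CLAIM (what is proved, stated in full; the proofs are below) =====
def Claim_equal_wines_top_down : Prop := ∀ (dp : List (List Int)) (prices : List Int) (L : Int) (R : Int) (y : Int), Dom_wines_top_down dp prices L R y → Pre_wines_top_down dp prices L R y → Spec_wines_top_down dp prices L R y (wines_top_down dp prices L R y)

-- ===== LEMMAS AND PROOFS =====

-- dp[l][r] as an Int-valued total read
def pvGD (dp : List (List Int)) (l r : Int) : Int :=
  PySem.List.pyGetD (PySem.List.pyGetD dp l []) r 0

-- the pure value both programs compute: A's recursion with the memo test read off the ORIGINAL dp
def pvV (dp : List (List Int)) (prices : List Int) (l r y : Int) : Int :=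
  if h : l > r then 0
  else
    let c := pvGD dp l r
    if c ≠ 0 then c
    else
      max (y * PySem.List.pyGetD prices l 0 + pvV dp prices (l + 1) r (y + 1))
          (y * PySem.List.pyGetD prices r 0 + pvV dp prices l (r - 1) (y + 1))
termination_by (r + 1 - l).toNat
decreasing_by all_goals omega

def pvShape (dp dp0 : List (List Int)) : Prop :=
  dp.length = dp0.length ∧ ∀ i : ℕ, (dp.getD i []).length = (dp0.getD i []).length

-- A's loop invariant: every cell of the working triangle holds its original value
-- or the pure value of its window
def pvInv (dp0 : List (List Int)) (prices : List Int) (L0 R0 y0 : Int) (dp : List (List Int)) : Prop :=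
  pvShape dp dp0 ∧
  ∀ l r : Int, L0 ≤ l → l ≤ R0 → L0 ≤ r → r ≤ R0 →
    (pvGD dp l r = pvGD dp0 l r ∨
     (pvGD dp0 l r = 0 ∧ pvGD dp l r = pvV dp0 prices l r (y0 + (R0 - L0) - (r - l))))

theorem pvGetD_toNat {α : Type} (xs : List α) (i : Int) (d : α) (h : 0 ≤ i) :
    PySem.List.pyGetD xs i d = xs.getD i.toNat d := by
  have := PySem.List.pyGetD_natCast (xs := xs) (n := i.toNat) (d := d)
  rwa [Int.toNat_of_nonneg h] at this

theorem pvNatGD_set (dp : List (List Int)) (i j i' j' : ℕ) (v : Int)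
    (hi : i < dp.length) (hj : j < (dp.getD i []).length) :
    ((dp.set i ((dp.getD i []).set j v)).getD i' []).getD j' 0 =
      if i' = i ∧ j' = j then v else (dp.getD i' []).getD j' 0 := by
  by_cases hii : i' = i
  · have h1 : (dp.set i ((dp.getD i []).set j v)).getD i' [] = (dp.getD i []).set j v := by
      rw [hii]
      simp [List.getD, hi]
    rw [h1]
    simp only [List.getD] at hj
    by_cases hjj : j' = j
    · rw [hjj]
      simp [List.getD, hj, hii]
    · simp [List.getD, hjj, Ne.symm hjj, hii]
  · have h1 : (dp.set i ((dp.getD i []).set j v)).getD i' [] = dp.getD i' [] := by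
      simp [List.getD, Ne.symm hii]
    rw [h1]
    simp [hii]

theorem pvGD_set (dp : List (List Int)) (l r v l' r' : Int)
    (hl0 : 0 ≤ l) (hl : l.toNat < dp.length) (hr0 : 0 ≤ r)
    (hr : r.toNat < (dp.getD l.toNat []).length)
    (hl'0 : 0 ≤ l') (hr'0 : 0 ≤ r') :
    pvGD (PySem.List.pySetD dp l (PySem.List.pySetD (PySem.List.pyGetD dp l []) r v)) l' r' =
      if l' = l ∧ r' = r then v else pvGD dp l' r' := by
  unfold pvGD
  rw [PySem.List.pySetD_of_nonneg _ _ hr0, PySem.List.pySetD_of_nonneg _ _ hl0,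
    pvGetD_toNat _ _ _ hl0]
  rw [pvGetD_toNat _ _ _ hl'0, pvGetD_toNat _ _ _ hr'0]
  rw [pvGetD_toNat _ _ _ hl'0, pvGetD_toNat _ _ _ hr'0]
  rw [pvNatGD_set dp l.toNat r.toNat l'.toNat r'.toNat v hl hr]
  have hiff : (l'.toNat = l.toNat ∧ r'.toNat = r.toNat) ↔ (l' = l ∧ r' = r) := by omega
  simp only [hiff]

theorem pvShape_set (dp : List (List Int)) (l r v : Int) (hl0 : 0 ≤ l) (hr0 : 0 ≤ r) :
    pvShape (PySem.List.pySetD dp l (PySem.List.pySetD (PySem.List.pyGetD dp l []) r v)) dp := by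
  rw [PySem.List.pySetD_of_nonneg _ _ hr0, PySem.List.pySetD_of_nonneg _ _ hl0,
    pvGetD_toNat _ _ _ hl0]
  constructor
  · simp
  · intro i
    by_cases hi : i = l.toNat
    · by_cases hlen : l.toNat < dp.length
      · simp [hi, List.getD, hlen]
      · simp [hi, List.getD, hlen]
    · simp [List.getD, Ne.symm hi]

theorem pvShape_trans {a b c : List (List Int)} (h1 : pvShape a b) (h2 : pvShape b c) :
    pvShape a c :=
  ⟨h1.1.trans h2.1, fun i => (h1.2 i).trans (h2.2 i)⟩

theorem pvA_main (dp0 : List (List Int)) (prices : List Int) (L0 R0 y0 : Int)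
    (hL0 : 0 ≤ L0) (hdR : R0 < (dp0.length : Int))
    (hrow : ∀ i ∈ Finset.Icc L0.toNat R0.toNat, R0 < ((dp0.getD i []).length : Int)) :
    ∀ (n : ℕ) (l r : Int) (dp : List (List Int)), (r + 1 - l).toNat ≤ n → L0 ≤ l → r ≤ R0 →
    pvInv dp0 prices L0 R0 y0 dp →
    (winesA_go dp prices l r (y0 + (R0 - L0) - (r - l))).1 =
        pvV dp0 prices l r (y0 + (R0 - L0) - (r - l)) ∧
      pvInv dp0 prices L0 R0 y0 (winesA_go dp prices l r (y0 + (R0 - L0) - (r - l))).2 := by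
  intro n
  induction n with
  | zero =>
    intro l r dp hn hLl hrR hinv
    have hlr : l > r := by omega
    rw [winesA_go, pvV]
    simp only [dif_pos hlr]
    exact ⟨by simp, hinv⟩
  | succ n ih =>
    intro l r dp hn hLl hrR hinv
    by_cases hlr : l > r
    · rw [winesA_go, pvV]
      simp only [dif_pos hlr]
      exact ⟨by simp, hinv⟩
    · have hlr' : l ≤ r := by omega
      rw [winesA_go]
      simp only [dif_neg hlr]
      by_cases hcur : PySem.List.pyGetD (PySem.List.pyGetD dp l []) r 0 ≠ 0
      · -- memo hit
        simp only [if_pos hcur]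
        refine ⟨?_, hinv⟩
        have hcell := hinv.2 l r hLl (by omega) (by omega) hrR
        simp only [pvGD] at hcell
        rcases hcell with hsame | ⟨hz, hval⟩
        · rw [pvV]
          simp only [dif_neg hlr, pvGD]
          rw [hsame] at hcur ⊢
          rw [if_pos hcur]
        · exact hval
      · -- compute
        simp only [if_neg hcur]
        rw [not_ne_iff] at hcur
        have hc0 : PySem.List.pyGetD (PySem.List.pyGetD dp0 l []) r 0 = 0 := by
          have hcell := hinv.2 l r hLl (by omega) (by omega) hrR
          simp only [pvGD] at hcell
          rcases hcell with hsame | ⟨hz, _⟩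
          · rw [← hsame]; exact hcur
          · exact hz
        have hy1 : y0 + (R0 - L0) - (r - l) + 1 = y0 + (R0 - L0) - (r - (l + 1)) := by ring
        have hy2 : y0 + (R0 - L0) - (r - l) + 1 = y0 + (R0 - L0) - (r - 1 - l) := by ring
        rw [hy1]
        obtain ⟨hv1, hinv1⟩ := ih (l + 1) r dp (by omega) (by omega) hrR hinv
        set dp1 := (winesA_go dp prices (l + 1) r (y0 + (R0 - L0) - (r - (l + 1)))).2 with hdp1
        have hcall2 : winesA_go dp1 prices l (r - 1) (y0 + (R0 - L0) - (r - (l + 1))) =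
            winesA_go dp1 prices l (r - 1) (y0 + (R0 - L0) - (r - 1 - l)) := by
          rw [show (y0 + (R0 - L0) - (r - (l + 1))) = (y0 + (R0 - L0) - (r - 1 - l)) from by ring]
        rw [hcall2]
        obtain ⟨hv2, hinv2⟩ := ih l (r - 1) dp1 (by omega) hLl (by omega) hinv1
        set dp2 := (winesA_go dp1 prices l (r - 1) (y0 + (R0 - L0) - (r - 1 - l))).2 with hdp2
        rw [hv1, hv2]
        have hsh := hinv2.1
        have hlt1 : l.toNat < dp2.length := by
          rw [hsh.1]; omega
        have hrowbig : R0 < ((dp2.getD l.toNat []).length : Int) := by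
          rw [hsh.2 l.toNat]
          exact hrow l.toNat (by simp only [Finset.mem_Icc]; omega)
        have hlt2 : r.toNat < (dp2.getD l.toNat []).length := by omega
        have hval : max ((y0 + (R0 - L0) - (r - l)) * PySem.List.pyGetD prices l 0 +
              pvV dp0 prices (l + 1) r (y0 + (R0 - L0) - (r - (l + 1))))
            ((y0 + (R0 - L0) - (r - l)) * PySem.List.pyGetD prices r 0 +
              pvV dp0 prices l (r - 1) (y0 + (R0 - L0) - (r - 1 - l))) =
            pvV dp0 prices l r (y0 + (R0 - L0) - (r - l)) := by
          conv_rhs => rw [pvV]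
          simp only [dif_neg hlr, pvGD, hc0]
          rw [hy1]
          rw [show pvV dp0 prices l (r - 1) (y0 + (R0 - L0) - (r - (l + 1))) =
              pvV dp0 prices l (r - 1) (y0 + (R0 - L0) - (r - 1 - l)) from by
            rw [show (y0 + (R0 - L0) - (r - (l + 1))) = (y0 + (R0 - L0) - (r - 1 - l)) from by
              ring]]
          simp
        rw [hval]
        refine ⟨rfl, ?_, ?_⟩
        · exact pvShape_trans (pvShape_set dp2 l r _ (by omega) (by omega)) hsh
        · intro l' r' h1 h2 h3 h4
          have hset := pvGD_set dp2 l r (pvV dp0 prices l r (y0 + (R0 - L0) - (r - l))) l' r'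
            (by omega) hlt1 (by omega) hlt2 (by omega) (by omega)
          rw [hset]
          by_cases hc : l' = l ∧ r' = r
          · rw [if_pos hc]
            right
            refine ⟨?_, ?_⟩
            · rw [hc.1, hc.2]
              simp only [pvGD]
              exact hc0
            · rw [hc.1, hc.2]
          · rw [if_neg hc]
            exact hinv2.2 l' r' h1 h2 h3 h4

-- B's invariant: the private table holds the pure value of every already-processed window
def pvQ (dp0 : List (List Int)) (prices : List Int) (L0 R0 y0 k a : Int)
    (best : PySem.Dict (Int × Int) Int) : Prop :=
  ∀ l r : Int, L0 ≤ l → l ≤ r → r ≤ R0 → (r - l + 1 < k ∨ (r - l + 1 = k ∧ l < a)) →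
    best.getD (l, r) 0 = pvV dp0 prices l r (y0 + (R0 - L0) - (r - l))

theorem pvB_inner (dp0 : List (List Int)) (prices : List Int) (L0 R0 y0 k : Int) (hk : 1 ≤ k) :
    ∀ (n : ℕ) (a : Int) (best : PySem.Dict (Int × Int) Int),
      (R0 - k + 2 - a).toNat ≤ n → L0 ≤ a →
      pvQ dp0 prices L0 R0 y0 k a best →
      pvQ dp0 prices L0 R0 y0 k (R0 - k + 2)
        ((PySem.List.pyRange a (R0 - k + 2) 1).foldl (fun best l =>
          let r := l + k - 1
          let c := PySem.List.pyGetD (PySem.List.pyGetD dp0 l []) r 0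
          if c ≠ 0 then best.insert (l, r) c
          else
            let left := if l + 1 ≤ r then best.getD (l + 1, r) 0 else 0
            let right := if l ≤ r - 1 then best.getD (l, r - 1) 0 else 0
            best.insert (l, r)
              (max ((y0 + (R0 - L0) - (k - 1)) * PySem.List.pyGetD prices l 0 + left)
                   ((y0 + (R0 - L0) - (k - 1)) * PySem.List.pyGetD prices r 0 + right))) best) := by
  intro n
  induction n with
  | zero =>
    intro a best hn ha hq
    rw [PySem.List.pyRange_one_eq_nil (by omega), List.foldl_nil]
    intro l r h1 h2 h3 h4
    refine hq l r h1 h2 h3 ?_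
    rcases h4 with h | ⟨h, h'⟩
    · exact Or.inl h
    · exact Or.inr ⟨h, by omega⟩
  | succ n ih =>
    intro a best hn ha hq
    by_cases hend : R0 - k + 2 ≤ a
    · rw [PySem.List.pyRange_one_eq_nil (by omega), List.foldl_nil]
      intro l r h1 h2 h3 h4
      refine hq l r h1 h2 h3 ?_
      rcases h4 with h | ⟨h, h'⟩
      · exact Or.inl h
      · exact Or.inr ⟨h, by omega⟩
    · rw [PySem.List.pyRange_one_cons (by omega), List.foldl_cons]
      refine ih (a + 1) _ (by omega) (by omega) ?_
      have hstep : ∀ V : Int, V = pvV dp0 prices a (a + k - 1) (y0 + (R0 - L0) - (k - 1)) →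
          pvQ dp0 prices L0 R0 y0 k (a + 1) (best.insert (a, a + k - 1) V) := by
        intro V hV l r h1 h2 h3 h4
        rw [PySem.Dict.getD_insert]
        by_cases hpair : (l, r) = (a, a + k - 1)
        · rw [if_pos hpair]
          rw [Prod.mk.injEq] at hpair
          obtain ⟨h5, h6⟩ := hpair
          rw [hV, h5, h6]
          rw [show y0 + (R0 - L0) - (a + k - 1 - a) = y0 + (R0 - L0) - (k - 1) from by ring]
        · rw [if_neg hpair]
          refine hq l r h1 h2 h3 ?_
          rw [Prod.mk.injEq] at hpair
          rcases h4 with h | ⟨h, h'⟩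
          · exact Or.inl h
          · refine Or.inr ⟨h, ?_⟩
            rcases not_and_or.mp hpair with h'' | h'' <;> omega
      show pvQ dp0 prices L0 R0 y0 k (a + 1)
        (if PySem.List.pyGetD (PySem.List.pyGetD dp0 a []) (a + k - 1) 0 ≠ 0 then
          best.insert (a, a + k - 1) (PySem.List.pyGetD (PySem.List.pyGetD dp0 a []) (a + k - 1) 0)
        else
          best.insert (a, a + k - 1)
            (max ((y0 + (R0 - L0) - (k - 1)) * PySem.List.pyGetD prices a 0 +
                (if a + 1 ≤ a + k - 1 then best.getD (a + 1, a + k - 1) 0 else 0))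
              ((y0 + (R0 - L0) - (k - 1)) * PySem.List.pyGetD prices (a + k - 1) 0 +
                (if a ≤ a + k - 1 - 1 then best.getD (a, a + k - 1 - 1) 0 else 0))))
      by_cases hC : PySem.List.pyGetD (PySem.List.pyGetD dp0 a []) (a + k - 1) 0 ≠ 0
      · rw [if_pos hC]
        refine hstep _ ?_
        rw [pvV]
        simp only [dif_neg (show ¬ a > a + k - 1 from by omega), pvGD]
        rw [if_pos hC]
      · rw [if_neg hC]
        rw [not_ne_iff] at hC
        refine hstep _ ?_
        rw [pvV]
        simp only [dif_neg (show ¬ a > a + k - 1 from by omega), pvGD, hC]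
        have hleft : (if a + 1 ≤ a + k - 1 then best.getD (a + 1, a + k - 1) 0 else 0) =
            pvV dp0 prices (a + 1) (a + k - 1) (y0 + (R0 - L0) - (k - 1) + 1) := by
          by_cases hk2 : a + 1 ≤ a + k - 1
          · rw [if_pos hk2,
              hq (a + 1) (a + k - 1) (by omega) (by omega) (by omega) (Or.inl (by omega)),
              show y0 + (R0 - L0) - (a + k - 1 - (a + 1)) = y0 + (R0 - L0) - (k - 1) + 1 from by
                ring]
          · rw [if_neg hk2, pvV]
            rw [dif_pos (show a + 1 > a + k - 1 from by omega)]
        have hright : (if a ≤ a + k - 1 - 1 then best.getD (a, a + k - 1 - 1) 0 else 0) =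
            pvV dp0 prices a (a + k - 1 - 1) (y0 + (R0 - L0) - (k - 1) + 1) := by
          by_cases hk2 : a ≤ a + k - 1 - 1
          · rw [if_pos hk2,
              hq a (a + k - 1 - 1) (by omega) (by omega) (by omega) (Or.inl (by omega)),
              show y0 + (R0 - L0) - (a + k - 1 - 1 - a) = y0 + (R0 - L0) - (k - 1) + 1 from by
                ring]
          · rw [if_neg hk2, pvV]
            rw [dif_pos (show a > a + k - 1 - 1 from by omega)]
        rw [hleft, hright]
        simp

theorem pvB_outer (dp0 : List (List Int)) (prices : List Int) (L0 R0 y0 : Int) (_hLR : L0 ≤ R0) :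
    ∀ (n : ℕ) (k : Int) (best : PySem.Dict (Int × Int) Int),
      (R0 - L0 + 2 - k).toNat ≤ n → 1 ≤ k →
      pvQ dp0 prices L0 R0 y0 k L0 best →
      pvQ dp0 prices L0 R0 y0 (R0 - L0 + 2) L0
        ((PySem.List.pyRange k (R0 - L0 + 2) 1).foldl (fun best length =>
          let year := y0 + (R0 - L0) - (length - 1)
          (PySem.List.pyRange L0 (R0 - length + 2) 1).foldl (fun best l =>
            let r := l + length - 1
            let c := PySem.List.pyGetD (PySem.List.pyGetD dp0 l []) r 0
            if c ≠ 0 then best.insert (l, r) c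
            else
              let left := if l + 1 ≤ r then best.getD (l + 1, r) 0 else 0
              let right := if l ≤ r - 1 then best.getD (l, r - 1) 0 else 0
              best.insert (l, r)
                (max (year * PySem.List.pyGetD prices l 0 + left)
                     (year * PySem.List.pyGetD prices r 0 + right))) best) best) := by
  intro n
  induction n with
  | zero =>
    intro k best hn hk hq
    rw [PySem.List.pyRange_one_eq_nil (by omega), List.foldl_nil]
    intro l r h1 h2 h3 _h4
    exact hq l r h1 h2 h3 (Or.inl (by omega))
  | succ n ih =>
    intro k best hn hk hq
    by_cases hend : R0 - L0 + 2 ≤ k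
    · rw [PySem.List.pyRange_one_eq_nil (by omega), List.foldl_nil]
      intro l r h1 h2 h3 _h4
      exact hq l r h1 h2 h3 (Or.inl (by omega))
    · rw [PySem.List.pyRange_one_cons (by omega), List.foldl_cons]
      refine ih (k + 1) _ (by omega) (by omega) ?_
      have hq2 := pvB_inner dp0 prices L0 R0 y0 k hk (R0 - k + 2 - L0).toNat L0 best
        (by omega) le_rfl hq
      exact fun l r h1 h2 h3 h4 => hq2 l r h1 h2 h3 (by
        rcases h4 with h | ⟨h, h'⟩
        · by_cases hlt : r - l + 1 < k
          · exact Or.inl hlt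
          · exact Or.inr ⟨by omega, by omega⟩
        · exact absurd h' (by omega))

theorem pvB_eq_pvV (dp0 : List (List Int)) (prices : List Int) (L0 R0 y0 : Int) :
    wines_top_down_alt dp0 prices L0 R0 y0 = pvV dp0 prices L0 R0 y0 := by
  by_cases hgt : L0 > R0
  · unfold wines_top_down_alt
    rw [pvV, if_pos hgt, dif_pos hgt]
  · unfold wines_top_down_alt
    rw [if_neg hgt]
    have hq0 : pvQ dp0 prices L0 R0 y0 1 L0 PySem.Dict.empty := by
      intro l r h1 h2 h3 h4
      rcases h4 with h | ⟨_, h'⟩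
      · exact absurd h (by omega)
      · exact absurd h' (by omega)
    have hq2 := pvB_outer dp0 prices L0 R0 y0 (by omega) (R0 - L0 + 2 - 1).toNat 1
      PySem.Dict.empty (by omega) le_rfl hq0
    have h3 := hq2 L0 R0 le_rfl (by omega) le_rfl (Or.inl (by omega))
    rw [show y0 + (R0 - L0) - (R0 - L0) = y0 from by ring] at h3
    exact h3

theorem pvA_eq_pvV (dp0 : List (List Int)) (prices : List Int) (L0 R0 y0 : Int)
    (hpre : Pre_wines_top_down dp0 prices L0 R0 y0) :
    wines_top_down dp0 prices L0 R0 y0 = pvV dp0 prices L0 R0 y0 := by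
  rcases hpre with hgt | ⟨hL0, hpl, hdl, hrow⟩
  · unfold wines_top_down
    rw [winesA_go, pvV]
    simp only [dif_pos hgt]
  · unfold wines_top_down
    have hinv0 : pvInv dp0 prices L0 R0 y0 dp0 :=
      ⟨⟨rfl, fun _ => rfl⟩, fun l r _ _ _ _ => Or.inl rfl⟩
    have h := (pvA_main dp0 prices L0 R0 y0 hL0 hdl hrow (R0 + 1 - L0).toNat L0 R0 dp0
      le_rfl le_rfl le_rfl hinv0).1
    rw [show y0 + (R0 - L0) - (R0 - L0) = y0 from by ring] at h
    exact h

-- ===== VERDICT (by name: the statement is the Claim_ definition above) =====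
theorem wines_top_down_spec : Claim_equal_wines_top_down := by
  intro dp prices L R y _hdom hpre
  unfold Spec_wines_top_down
  rw [pvA_eq_pvV dp prices L R y hpre, pvB_eq_pvV]
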